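-- pv_equiv track=rewrite | github.com/ArabotHXL/BTC_project | services/ip_scanner.py | _identify_type_from_string
-- ===== SOURCE A (Python) =====
-- from enum import Enum
--
-- class MinerType(Enum):
--     ANTMINER = "antminer"
--     WHATSMINER = "whatsminer"
--     AVALON = "avalon"
--     BRAIINS = "braiins"
--     VNISH = "vnish"
--     LUXOS = "luxos"
--     UNKNOWN = "unknown"
--
-- def _identify_type_from_string(type_string: str) -> str:
--     """Identify miner type from a type string"""
--     if not type_string:
--         return MinerType.UNKNOWN.value
--
--     type_lower = type_string.lower()
--
--     if any(x in type_lower for x in ['antminer', 'bmminer', 's19', 's21', 't19', 't21']):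
--         return MinerType.ANTMINER.value
--     elif any(x in type_lower for x in ['whatsminer', 'btminer', 'm30', 'm50', 'm60']):
--         return MinerType.WHATSMINER.value
--     elif any(x in type_lower for x in ['avalon', 'canaan']):
--         return MinerType.AVALON.value
--     elif any(x in type_lower for x in ['braiins', 'bosminer', 'bos']):
--         return MinerType.BRAIINS.value
--     elif 'vnish' in type_lower:
--         return MinerType.VNISH.value
--     elif any(x in type_lower for x in ['luxos', 'luxor']):
--         return MinerType.LUXOS.value
--
--     return MinerType.UNKNOWN.value
-- ===== SOURCE B (Python) =====
-- # B: aggregate-then-select classifier. A flat keyword->priority map is scanned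
-- # once to collect the priorities of ALL matching keywords; the answer is the
-- # table entry at the MINIMUM matched priority (6 = no match = unknown).
-- KEYWORD_PRIORITY = {
--     'antminer': 0, 'bmminer': 0, 's19': 0, 's21': 0, 't19': 0, 't21': 0,
--     'whatsminer': 1, 'btminer': 1, 'm30': 1, 'm50': 1, 'm60': 1,
--     'avalon': 2, 'canaan': 2,
--     'braiins': 3, 'bosminer': 3, 'bos': 3,
--     'vnish': 4,
--     'luxos': 5, 'luxor': 5,
-- }
-- RESULTS = ('antminer', 'whatsminer', 'avalon', 'braiins', 'vnish', 'luxos', 'unknown')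
--
-- def _identify_type_from_string(type_string: str) -> str:
--     t = type_string.lower()
--     best = min((p for k, p in KEYWORD_PRIORITY.items() if k in t), default=6)
--     return RESULTS[best]
-- ===== Notes on version B (the rewrite author's own statement) =====
-- stated objective: alternative
-- what changed: Replaces A's ordered if/elif chain (first matching category wins via short-circuit) with an aggregate-then-select scheme: a flat keyword-to-priority map is scanned once to collect the priorities of all matching keywords, and the answer is a table lookup at the minimum matched priority (default 6 = unknown), with no early return and no per-category branching.
import Mathlib
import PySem

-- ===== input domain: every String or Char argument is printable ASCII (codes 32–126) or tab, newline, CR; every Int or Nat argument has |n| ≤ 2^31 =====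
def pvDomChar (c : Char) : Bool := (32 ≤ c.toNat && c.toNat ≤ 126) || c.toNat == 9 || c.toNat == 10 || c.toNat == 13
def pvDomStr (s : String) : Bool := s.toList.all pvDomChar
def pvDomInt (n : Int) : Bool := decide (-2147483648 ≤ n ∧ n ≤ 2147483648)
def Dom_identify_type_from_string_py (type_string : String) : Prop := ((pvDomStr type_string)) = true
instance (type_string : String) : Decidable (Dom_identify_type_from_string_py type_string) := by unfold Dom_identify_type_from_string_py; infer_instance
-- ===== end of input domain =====

-- B replaces A's ordered if/elif chain with an aggregate-then-select scheme: collect the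
-- priorities of all matching keywords from one flat keyword->priority table and return the
-- result at the minimum matched priority (objective: alternative, same cost).


-- ===== PORT A =====
def identify_type_from_string_py (type_string : String) : String :=
  if type_string = "" then "unknown"
  else
    let type_lower := PySem.Str.lower type_string
    if ["antminer", "bmminer", "s19", "s21", "t19", "t21"].any (fun x => PySem.Str.isIn x type_lower) then "antminer"
    else if ["whatsminer", "btminer", "m30", "m50", "m60"].any (fun x => PySem.Str.isIn x type_lower) then "whatsminer"
    else if ["avalon", "canaan"].any (fun x => PySem.Str.isIn x type_lower) then "avalon"
    else if ["braiins", "bosminer", "bos"].any (fun x => PySem.Str.isIn x type_lower) then "braiins"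
    else if PySem.Str.isIn "vnish" type_lower then "vnish"
    else if ["luxos", "luxor"].any (fun x => PySem.Str.isIn x type_lower) then "luxos"
    else "unknown"

-- ===== PORT B =====
-- KEYWORD_PRIORITY dict as an association list in insertion order
def pvKeywordPriority : List (String × Int) :=
  [("antminer", 0), ("bmminer", 0), ("s19", 0), ("s21", 0), ("t19", 0), ("t21", 0),
   ("whatsminer", 1), ("btminer", 1), ("m30", 1), ("m50", 1), ("m60", 1),
   ("avalon", 2), ("canaan", 2),
   ("braiins", 3), ("bosminer", 3), ("bos", 3),
   ("vnish", 4),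
   ("luxos", 5), ("luxor", 5)]

def pvResults : List String :=
  ["antminer", "whatsminer", "avalon", "braiins", "vnish", "luxos", "unknown"]

-- best = min((p for k, p in KEYWORD_PRIORITY.items() if k in t), default=6); return RESULTS[best]
-- (RESULTS[best]: best is always in [0,6], so the .getD totalization of pyGet? is unreachable)
def identify_type_from_string_py_alt (type_string : String) : String :=
  (PySem.List.pyGet? pvResults
    (PySem.List.minD
      (pvKeywordPriority.filterMap
        (fun kp => if PySem.Str.isIn kp.1 (PySem.Str.lower type_string) then some kp.2 else none))
      (fun p => p) 6)).getD "unknown"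

-- ===== PRECONDITION & SPEC =====
def Spec_identify_type_from_string_py (type_string : String) (out : String) : Prop := out = identify_type_from_string_py_alt type_string
instance (type_string : String) (out : String) : Decidable (Spec_identify_type_from_string_py type_string out) := by unfold Spec_identify_type_from_string_py; infer_instance

-- ===== CLAIM (what is proved, stated in full; the proofs are below) =====
def Claim_equal_identify_type_from_string_py : Prop := ∀ (type_string : String), Dom_identify_type_from_string_py type_string → Spec_identify_type_from_string_py type_string (identify_type_from_string_py type_string)

-- ===== LEMMAS AND PROOFS =====

-- The minimum matched priority is i as soon as some keyword of priority i matches and every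
-- matching keyword has priority ≥ i.
lemma pv_min_hits (t : String) (i : Int)
    (hmem : ∃ kp ∈ pvKeywordPriority, PySem.Str.isIn kp.1 t = true ∧ kp.2 = i)
    (hlow : ∀ kp ∈ pvKeywordPriority, PySem.Str.isIn kp.1 t = true → i ≤ kp.2) :
    PySem.List.minD
      (pvKeywordPriority.filterMap (fun kp => if PySem.Str.isIn kp.1 t then some kp.2 else none))
      (fun p => p) 6 = i := by
  obtain ⟨kp, hkp, hin, hpi⟩ := hmem
  have hiL : i ∈ pvKeywordPriority.filterMap
      (fun kp => if PySem.Str.isIn kp.1 t then some kp.2 else none) :=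
    List.mem_filterMap.mpr ⟨kp, hkp, by rw [if_pos hin, hpi]⟩
  cases hm : PySem.List.min?
      (pvKeywordPriority.filterMap (fun kp => if PySem.Str.isIn kp.1 t then some kp.2 else none))
      (fun p => p) with
  | none =>
      rw [PySem.List.min?_eq_none_iff] at hm
      rw [hm] at hiL
      cases hiL
  | some m =>
      have hmL := PySem.List.min?_mem hm
      have hmin := PySem.List.min?_isMin hm i hiL
      obtain ⟨kq, hq, hq2⟩ := List.mem_filterMap.mp hmL
      by_cases hb : PySem.Str.isIn kq.1 t = true
      · rw [if_pos hb] at hq2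
        have hkq2 : kq.2 = m := by injection hq2
        have hlo := hlow kq hq hb
        simp only [PySem.List.minD, hm, Option.getD_some]
        omega
      · rw [if_neg hb] at hq2
        cases hq2

-- ===== VERDICT (by name: the statement is the Claim_ definition above) =====
set_option maxHeartbeats 1600000 in
theorem identify_type_from_string_py_spec : Claim_equal_identify_type_from_string_py := by
  intro s _
  unfold Spec_identify_type_from_string_py
  by_cases hs : s = ""
  · subst hs; decide
  · unfold identify_type_from_string_py identify_type_from_string_py_alt
    rw [if_neg hs]
    set t := PySem.Str.lower s with ht
    by_cases h0 : (["antminer", "bmminer", "s19", "s21", "t19", "t21"].any (fun x => PySem.Str.isIn x t)) = true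
    · rw [if_pos h0]
      rw [pv_min_hits t 0 ?_ ?_]
      · decide
      · simp only [List.any_eq_true] at h0
        obtain ⟨k, hk, hkt⟩ := h0
        exact ⟨(k, 0), by fin_cases hk <;> decide, hkt, rfl⟩
      · intro kp hkp _
        fin_cases hkp <;> decide
    · rw [if_neg h0]
      by_cases h1 : (["whatsminer", "btminer", "m30", "m50", "m60"].any (fun x => PySem.Str.isIn x t)) = true
      · rw [if_pos h1]
        rw [pv_min_hits t 1 ?_ ?_]
        · decide
        · simp only [List.any_eq_true] at h1
          obtain ⟨k, hk, hkt⟩ := h1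
          exact ⟨(k, 1), by fin_cases hk <;> decide, hkt, rfl⟩
        · intro kp hkp hin
          simp only [List.any_eq_true, not_exists] at h0
          fin_cases hkp <;> simp_all
      · rw [if_neg h1]
        by_cases h2 : (["avalon", "canaan"].any (fun x => PySem.Str.isIn x t)) = true
        · rw [if_pos h2]
          rw [pv_min_hits t 2 ?_ ?_]
          · decide
          · simp only [List.any_eq_true] at h2
            obtain ⟨k, hk, hkt⟩ := h2
            exact ⟨(k, 2), by fin_cases hk <;> decide, hkt, rfl⟩
          · intro kp hkp hin
            simp only [List.any_eq_true, not_exists] at h0 h1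
            fin_cases hkp <;> simp_all
        · rw [if_neg h2]
          by_cases h3 : (["braiins", "bosminer", "bos"].any (fun x => PySem.Str.isIn x t)) = true
          · rw [if_pos h3]
            rw [pv_min_hits t 3 ?_ ?_]
            · decide
            · simp only [List.any_eq_true] at h3
              obtain ⟨k, hk, hkt⟩ := h3
              exact ⟨(k, 3), by fin_cases hk <;> decide, hkt, rfl⟩
            · intro kp hkp hin
              simp only [List.any_eq_true, not_exists] at h0 h1 h2
              fin_cases hkp <;> simp_all
          · rw [if_neg h3]
            by_cases h4 : PySem.Str.isIn "vnish" t = true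
            · rw [if_pos h4]
              rw [pv_min_hits t 4 ?_ ?_]
              · decide
              · exact ⟨("vnish", 4), by decide, h4, rfl⟩
              · intro kp hkp hin
                simp only [List.any_eq_true, not_exists] at h0 h1 h2 h3
                fin_cases hkp <;> simp_all
            · rw [if_neg h4]
              by_cases h5 : (["luxos", "luxor"].any (fun x => PySem.Str.isIn x t)) = true
              · rw [if_pos h5]
                rw [pv_min_hits t 5 ?_ ?_]
                · decide
                · simp only [List.any_eq_true] at h5
                  obtain ⟨k, hk, hkt⟩ := h5
                  exact ⟨(k, 5), by fin_cases hk <;> decide, hkt, rfl⟩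
                · intro kp hkp hin
                  simp only [List.any_eq_true, not_exists] at h0 h1 h2 h3
                  fin_cases hkp <;> simp_all
              · rw [if_neg h5]
                simp only [List.any_eq_true, not_exists, not_and,
                  Bool.not_eq_true] at h0 h1 h2 h3 h5
                have hL : pvKeywordPriority.filterMap
                    (fun kp => if PySem.Str.isIn kp.1 t then some kp.2 else none) = [] := by
                  simp only [Bool.not_eq_true] at h4
                  simp only [pvKeywordPriority, List.filterMap_cons, List.filterMap_nil,
                    h0 "antminer" (by simp), h0 "bmminer" (by simp), h0 "s19" (by simp),
                    h0 "s21" (by simp), h0 "t19" (by simp), h0 "t21" (by simp),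
                    h1 "whatsminer" (by simp), h1 "btminer" (by simp), h1 "m30" (by simp),
                    h1 "m50" (by simp), h1 "m60" (by simp),
                    h2 "avalon" (by simp), h2 "canaan" (by simp),
                    h3 "braiins" (by simp), h3 "bosminer" (by simp), h3 "bos" (by simp),
                    h4, h5 "luxos" (by simp), h5 "luxor" (by simp),
                    Bool.false_eq_true, if_false]
                rw [hL]
                decide
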